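-- pv_equiv track=rewrite | github.com/EHTeamUp/teamup-backend | routers/synergy.py | map_tags_to_fields
-- ===== SOURCE A (Python) =====
-- from typing import List
--
-- def map_tags_to_fields(required_tags: List[str]) -> dict:
--     """required_tags_json을 tendency_type, goal, time, problem으로 매핑"""
--     mapping = {
--         'tendency_type': None,
--         'goal': None,
--         'time': None,
--         'problem': None
--     }
--
--     for tag in required_tags:
--         if tag in ['LEADER', 'SUPPORTER']:
--             mapping['tendency_type'] = tag
--         elif tag in ['QUALITY', 'SCHEDULE']:
--             mapping['goal'] = tag
--         elif tag in ['MORNING', 'NIGHT']: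
--             mapping['time'] = tag
--         elif tag in ['ANALYTIC', 'ADHOC']:
--             mapping['problem'] = tag
--
--     return mapping
-- ===== SOURCE B (Python) =====
-- from typing import List
--
-- FIELD_TABLE = [
--     ('tendency_type', ('LEADER', 'SUPPORTER')),
--     ('goal', ('QUALITY', 'SCHEDULE')),
--     ('time', ('MORNING', 'NIGHT')),
--     ('problem', ('ANALYTIC', 'ADHOC')),
-- ]
--
-- def map_tags_to_fields(required_tags: List[str]) -> dict:
--     # per-field scan: for each field take the last matching tag (first in reversed order)
--     return {
--         field: next((t for t in reversed(required_tags) if t in allowed), None)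
--         for field, allowed in FIELD_TABLE
--     }
-- ===== Notes on version B (the rewrite author's own statement) =====
-- stated objective: alternative
-- what changed: Replaces the single if/elif pass that overwrites a dict with a declarative field->allowed-tags table and a per-field reversed scan picking the last matching tag.
import Mathlib
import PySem

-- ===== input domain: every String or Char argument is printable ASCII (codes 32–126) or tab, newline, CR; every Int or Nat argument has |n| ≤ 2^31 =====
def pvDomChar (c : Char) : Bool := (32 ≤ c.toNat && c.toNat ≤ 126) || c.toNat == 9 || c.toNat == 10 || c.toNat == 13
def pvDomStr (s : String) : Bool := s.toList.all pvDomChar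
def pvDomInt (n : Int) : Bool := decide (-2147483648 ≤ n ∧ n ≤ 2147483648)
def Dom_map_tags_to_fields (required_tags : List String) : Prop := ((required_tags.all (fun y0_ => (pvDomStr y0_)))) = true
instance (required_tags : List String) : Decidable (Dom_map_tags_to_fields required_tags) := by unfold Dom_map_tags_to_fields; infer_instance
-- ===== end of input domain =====

-- ===== PORT A =====
-- B replaces A's single if/elif overwrite pass with a field->allowed-tags table and a per-field reversed scan (last match); alternative decomposition, same cost.
def map_tags_to_fields (required_tags : List String) : List (String × Option String) :=
  (required_tags.foldl (fun m tag =>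
      if ["LEADER", "SUPPORTER"].contains tag then m.insert "tendency_type" (some tag)
      else if ["QUALITY", "SCHEDULE"].contains tag then m.insert "goal" (some tag)
      else if ["MORNING", "NIGHT"].contains tag then m.insert "time" (some tag)
      else if ["ANALYTIC", "ADHOC"].contains tag then m.insert "problem" (some tag)
      else m)
    (PySem.Dict.mk [("tendency_type", (none : Option String)), ("goal", none), ("time", none), ("problem", none)])).items

-- ===== PORT B =====
def fieldTable : List (String × List String) :=
  [("tendency_type", ["LEADER", "SUPPORTER"]), ("goal", ["QUALITY", "SCHEDULE"]),
   ("time", ["MORNING", "NIGHT"]), ("problem", ["ANALYTIC", "ADHOC"])]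

def map_tags_to_fields_alt (required_tags : List String) : List (String × Option String) :=
  fieldTable.map (fun fa => (fa.1, required_tags.reverse.find? (fun t => fa.2.contains t)))

-- ===== PRECONDITION & SPEC =====
def Spec_map_tags_to_fields (required_tags : List String) (out : List (String × Option String)) : Prop := out = map_tags_to_fields_alt required_tags
instance (required_tags : List String) (out : List (String × Option String)) : Decidable (Spec_map_tags_to_fields required_tags out) := by unfold Spec_map_tags_to_fields; infer_instance

-- ===== CLAIM (what is proved, stated in full; the proofs are below) =====
def Claim_equal_map_tags_to_fields : Prop := ∀ (required_tags : List String), Dom_map_tags_to_fields required_tags → Spec_map_tags_to_fields required_tags (map_tags_to_fields required_tags)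

-- ===== LEMMAS AND PROOFS =====

-- "last write wins": combine an optionally found later tag with the earlier value
def updLast : Option String → Option String → Option String
  | some t, _ => some t
  | none, v => v

theorem updLast_or (o₁ o₂ : Option String) (v : Option String) :
    updLast (o₁.or o₂) v = updLast o₁ (updLast o₂ v) := by
  cases o₁ <;> rfl

theorem find?_append_or {α : Type} (p : α → Bool) (l₁ l₂ : List α) :
    (l₁ ++ l₂).find? p = (l₁.find? p).or (l₂.find? p) := by
  induction l₁ with
  | nil => rfl
  | cons a l ih => by_cases h : p a <;> simp [h, ih]

theorem loop_items (ts : List String) (v₁ v₂ v₃ v₄ : Option String) :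
    (ts.foldl (fun m tag =>
        if ["LEADER", "SUPPORTER"].contains tag then m.insert "tendency_type" (some tag)
        else if ["QUALITY", "SCHEDULE"].contains tag then m.insert "goal" (some tag)
        else if ["MORNING", "NIGHT"].contains tag then m.insert "time" (some tag)
        else if ["ANALYTIC", "ADHOC"].contains tag then m.insert "problem" (some tag)
        else m)
      (PySem.Dict.mk [("tendency_type", v₁), ("goal", v₂), ("time", v₃), ("problem", v₄)])).items =
    [("tendency_type", updLast (ts.reverse.find? (fun t => ["LEADER", "SUPPORTER"].contains t)) v₁),
     ("goal", updLast (ts.reverse.find? (fun t => ["QUALITY", "SCHEDULE"].contains t)) v₂),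
     ("time", updLast (ts.reverse.find? (fun t => ["MORNING", "NIGHT"].contains t)) v₃),
     ("problem", updLast (ts.reverse.find? (fun t => ["ANALYTIC", "ADHOC"].contains t)) v₄)] := by
  induction ts generalizing v₁ v₂ v₃ v₄ with
  | nil => rfl
  | cons t ts ih =>
    simp only [List.foldl_cons, List.reverse_cons, find?_append_or, updLast_or]
    by_cases h1 : (["LEADER", "SUPPORTER"].contains t) = true
    · simp only [List.contains_cons, List.contains_nil, Bool.or_eq_true, beq_iff_eq,
        Bool.or_false] at h1
      rcases h1 with h1 | h1 <;> subst h1 <;>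
        simpa [PySem.Dict.insert, List.find?, updLast] using ih _ _ _ _
    · by_cases h2 : (["QUALITY", "SCHEDULE"].contains t) = true
      · simp only [List.contains_cons, List.contains_nil, Bool.or_eq_true, beq_iff_eq,
          Bool.or_false] at h2
        rcases h2 with h2 | h2 <;> subst h2 <;>
          simpa [PySem.Dict.insert, List.find?, updLast] using ih _ _ _ _
      · by_cases h3 : (["MORNING", "NIGHT"].contains t) = true
        · simp only [List.contains_cons, List.contains_nil, Bool.or_eq_true, beq_iff_eq,
            Bool.or_false] at h3
          rcases h3 with h3 | h3 <;> subst h3 <;>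
            simpa [PySem.Dict.insert, List.find?, updLast] using ih _ _ _ _
        · by_cases h4 : (["ANALYTIC", "ADHOC"].contains t) = true
          · simp only [List.contains_cons, List.contains_nil, Bool.or_eq_true, beq_iff_eq,
              Bool.or_false] at h4
            rcases h4 with h4 | h4 <;> subst h4 <;>
              simpa [PySem.Dict.insert, List.find?, updLast] using ih _ _ _ _
          · rw [if_neg h1, if_neg h2, if_neg h3, if_neg h4, ih]
            simp only [List.find?_cons_of_neg h1, List.find?_cons_of_neg h2,
              List.find?_cons_of_neg h3, List.find?_cons_of_neg h4, List.find?_nil, updLast]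

theorem updLast_none (o : Option String) : updLast o none = o := by cases o <;> rfl

-- ===== VERDICT (by name: the statement is the Claim_ definition above) =====
theorem map_tags_to_fields_spec : Claim_equal_map_tags_to_fields := by
  intro ts _
  unfold Spec_map_tags_to_fields map_tags_to_fields map_tags_to_fields_alt fieldTable
  rw [loop_items]
  simp [updLast_none]
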